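-- pv_equiv track=rewrite | github.com/JeanLouisDufour/hdl | verilog_preproc.py | pp_args
-- ===== SOURCE A (Python) =====
-- def pp_args(s):
-- 	""" returns une paire (arg_list/None , length)
-- 	on peut avoir 0 argument -> []
-- 	"""
-- 	if s=='' or s[0] != '(': return None,-1
-- 	ii = last_ii = 1; nb_par = 0; eff_params = []
-- 	while ii < len(s) and not(nb_par == 0 and s[ii] == ')'):
-- 		if s[ii] == '(': nb_par += 1
-- 		elif s[ii] == ')': nb_par -= 1
-- 		elif nb_par == 0 and s[ii] == ',':
-- 			eff_params.append(s[last_ii:ii].strip())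
-- 			last_ii = ii+1
-- 		ii +=1
-- 	if ii < len(s):
-- 		eff_params.append(s[last_ii:ii].strip())
-- 		if eff_params == ['']: eff_params = []
-- 		if any(p=='' for p in eff_params):
-- 			return None, -1
-- 		else:
-- 			return eff_params, ii+1
-- 	else:
-- 		return None, -1
-- ===== SOURCE B (Python) =====
-- def _find_close(s):
--     depth = 0
--     for i in range(1, len(s)):
--         c = s[i]
--         if c == '(':
--             depth += 1
--         elif c == ')':
--             if depth == 0:
--                 return i
--             depth -= 1
--     return None
--
-- def _top_commas(s, close):
--     depth = 0
--     commas = []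
--     for i in range(1, close):
--         c = s[i]
--         if c == '(':
--             depth += 1
--         elif c == ')':
--             depth -= 1
--         elif depth == 0 and c == ',':
--             commas.append(i)
--     return commas
--
-- def pp_args(s):
--     if s == '' or s[0] != '(':
--         return None, -1
--     close = _find_close(s)
--     if close is None:
--         return None, -1
--     commas = _top_commas(s, close)
--     starts = [1] + [i + 1 for i in commas]
--     ends = commas + [close]
--     fields = [s[a:b].strip() for a, b in zip(starts, ends)]
--     if fields == ['']:
--         fields = []
--     if any(p == '' for p in fields):
--         return None, -1
--     return fields, close + 1
-- ===== Notes on version B (the rewrite author's own statement) =====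
-- stated objective: alternative
-- what changed: A builds the fields inline during one index/depth scan with a last_ii cursor; B first finds the matching top-level closing parenthesis with a depth scan, then collects the depth-0 comma positions over the inner region, and produces the fields by slicing between consecutive boundaries with a zip comprehension.
import Mathlib
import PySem

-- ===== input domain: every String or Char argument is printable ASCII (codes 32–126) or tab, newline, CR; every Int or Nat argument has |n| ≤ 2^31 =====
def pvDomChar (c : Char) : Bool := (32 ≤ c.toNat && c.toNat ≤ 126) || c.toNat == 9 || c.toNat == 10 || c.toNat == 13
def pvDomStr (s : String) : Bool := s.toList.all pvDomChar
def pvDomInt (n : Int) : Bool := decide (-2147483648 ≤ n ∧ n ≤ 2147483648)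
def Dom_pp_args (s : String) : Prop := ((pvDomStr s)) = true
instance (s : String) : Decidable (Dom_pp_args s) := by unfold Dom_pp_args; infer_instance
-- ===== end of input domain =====

-- B restructures A's single inline scan into: find the matching ')', collect depth-0 comma
-- positions, slice between boundaries (objective: alternative decomposition, same cost).

-- ===== PORT A =====
-- A's while-loop: state (ii, last_ii, nb_par, eff_params); returns the state at exit.
def ppArgsLoopA (cs : List Char) (ii last : Nat) (nb : Int) (acc : List (List Char)) :
    Nat × Nat × List (List Char) :=
  if h : ii < cs.length then
    if nb = 0 ∧ cs[ii] = ')' then (ii, last, acc)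
    else if cs[ii] = '(' then ppArgsLoopA cs (ii+1) last (nb+1) acc
    else if cs[ii] = ')' then ppArgsLoopA cs (ii+1) last (nb-1) acc
    else if nb = 0 ∧ cs[ii] = ',' then
      ppArgsLoopA cs (ii+1) (ii+1) nb
        (acc ++ [PySem.Chars.strip (PySem.List.slice cs (some (last:Int)) (some (ii:Int)))])
    else ppArgsLoopA cs (ii+1) last nb acc
  else (ii, last, acc)
termination_by cs.length - ii

def pp_args (s : String) : Option (List String) × Int :=
  let cs := s.toList
  if s = "" ∨ cs.head? ≠ some '(' then (none, -1)
  else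
    let r := ppArgsLoopA cs 1 1 0 []
    if r.1 < cs.length then
      let eff := r.2.2 ++ [PySem.Chars.strip (PySem.List.slice cs (some (r.2.1:Int)) (some (r.1:Int)))]
      let eff := if eff = [[]] then [] else eff
      if eff.any (fun p => p = []) then (none, -1)
      else (some (eff.map (fun p => String.ofList p)), (r.1:Int) + 1)
    else (none, -1)

-- ===== PORT B =====
-- index of the ')' matching s[0], scanning from i at depth d (B's _find_close)
def ppFindClose (cs : List Char) (i : Nat) (d : Int) : Option Nat :=
  if h : i < cs.length then
    if cs[i] = '(' then ppFindClose cs (i+1) (d+1)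
    else if cs[i] = ')' then (if d = 0 then some i else ppFindClose cs (i+1) (d-1))
    else ppFindClose cs (i+1) d
  else none
termination_by cs.length - i

-- positions of depth-0 commas in cs[i:stop] (B's _top_commas); the i < cs.length guard only makes it total
def ppTopCommas (cs : List Char) (i stop : Nat) (d : Int) : List Nat :=
  if i < stop then
    if h : i < cs.length then
      if cs[i] = '(' then ppTopCommas cs (i+1) stop (d+1)
      else if cs[i] = ')' then ppTopCommas cs (i+1) stop (d-1)
      else if d = 0 ∧ cs[i] = ',' then i :: ppTopCommas cs (i+1) stop d
      else ppTopCommas cs (i+1) stop d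
    else []
  else []
termination_by stop - i

def pp_args_alt (s : String) : Option (List String) × Int :=
  let cs := s.toList
  if s = "" ∨ cs.head? ≠ some '(' then (none, -1)
  else
    match ppFindClose cs 1 0 with
    | none => (none, -1)
    | some close =>
      let commas := ppTopCommas cs 1 close 0
      let fields := (((1 :: commas.map (fun i => i + 1) : List Nat)).zip (commas ++ [close])).map
        (fun ab => PySem.Chars.strip (PySem.List.slice cs (some (ab.1:Int)) (some (ab.2:Int))))
      let fields := if fields = [[]] then [] else fields
      if fields.any (fun p => p = []) then (none, -1)
      else (some (fields.map (fun p => String.ofList p)), (close:Int) + 1)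

-- ===== PRECONDITION & SPEC =====
def Spec_pp_args (s : String) (out : Option (List String) × Int) : Prop := out = pp_args_alt s
instance (s : String) (out : Option (List String) × Int) : Decidable (Spec_pp_args s out) := by unfold Spec_pp_args; infer_instance

-- ===== CLAIM (what is proved, stated in full; the proofs are below) =====
def Claim_equal_pp_args : Prop := ∀ (s : String), Dom_pp_args s → Spec_pp_args s (pp_args s)

-- ===== LEMMAS AND PROOFS =====

-- last_ii at loop exit, expressed from the comma positions
def ppLast (last : Nat) (cm : List Nat) : Nat :=
  match cm.getLast? with
  | some p => p + 1
  | none => last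

-- the fields A has appended by loop exit, from the comma positions
def ppFields (cs : List Char) (last : Nat) (cm : List Nat) : List (List Char) :=
  ((last :: cm.map (· + 1)).zip cm).map
    (fun ab => PySem.Chars.strip (PySem.List.slice cs (some (ab.1:Int)) (some (ab.2:Int))))

lemma ppFindClose_bound_aux (cs : List Char) : ∀ n i d j, cs.length - i ≤ n →
    ppFindClose cs i d = some j → i ≤ j ∧ j < cs.length := by
  intro n
  induction n with
  | zero =>
    intro i d j hn h
    rw [ppFindClose] at h
    have hi : ¬ i < cs.length := by omega
    simp [hi] at h
  | succ n ih =>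
    intro i d j hn h
    rw [ppFindClose] at h
    by_cases hi : i < cs.length
    · simp only [hi, dif_pos] at h
      split_ifs at h with h1 h2 h3
      · have := ih (i+1) (d+1) j (by omega) h
        exact ⟨by omega, this.2⟩
      · simp at h; omega
      · have := ih (i+1) (d-1) j (by omega) h
        exact ⟨by omega, this.2⟩
      · have := ih (i+1) d j (by omega) h
        exact ⟨by omega, this.2⟩
    · simp [hi] at h

lemma ppFindClose_bound (cs : List Char) (i : Nat) (d : Int) (j : Nat)
    (h : ppFindClose cs i d = some j) : i ≤ j ∧ j < cs.length :=
  ppFindClose_bound_aux cs (cs.length - i) i d j le_rfl h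

lemma loopA_none_aux (cs : List Char) : ∀ n i last nb acc, cs.length - i ≤ n →
    ppFindClose cs i nb = none → cs.length ≤ (ppArgsLoopA cs i last nb acc).1 := by
  intro n
  induction n with
  | zero =>
    intro i last nb acc hn h
    have hi : ¬ i < cs.length := by omega
    rw [ppArgsLoopA]
    simp [hi]
    omega
  | succ n ih =>
    intro i last nb acc hn h
    rw [ppArgsLoopA]
    rw [ppFindClose] at h
    by_cases hi : i < cs.length
    · simp only [hi, dif_pos] at h ⊢
      by_cases hp : cs[i] = '('
      · simp only [hp, if_pos] at h ⊢
        rw [if_neg (by simp)]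
        exact ih (i+1) last (nb+1) acc (by omega) h
      · by_cases hq : cs[i] = ')'
        · simp only [hq, if_pos] at h
          by_cases hz : nb = 0
          · simp [hz] at h
          · rw [if_neg (by tauto), if_neg hp, if_pos hq]
            simp only [hz, reduceIte] at h
            exact ih (i+1) last (nb-1) acc (by omega) h
        · simp only [hp, hq, reduceIte] at h
          rw [if_neg (by tauto), if_neg hp, if_neg hq]
          by_cases hc : nb = 0 ∧ cs[i] = ','
          · rw [if_pos hc]
            exact ih (i+1) (i+1) nb _ (by omega) h
          · rw [if_neg hc]
            exact ih (i+1) last nb acc (by omega) h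
    · simp [hi]; omega

lemma loopA_none (cs : List Char) (i last : Nat) (nb : Int) (acc : List (List Char))
    (h : ppFindClose cs i nb = none) : cs.length ≤ (ppArgsLoopA cs i last nb acc).1 :=
  loopA_none_aux cs (cs.length - i) i last nb acc le_rfl h

lemma ppLast_cons (last a : Nat) (cm : List Nat) : ppLast last (a :: cm) = ppLast (a+1) cm := by
  cases cm <;> simp [ppLast, List.getLast?_cons]

lemma ppFields_cons (cs : List Char) (last a : Nat) (cm : List Nat) :
    ppFields cs last (a :: cm) =
      PySem.Chars.strip (PySem.List.slice cs (some (last:Int)) (some (a:Int))) :: ppFields cs (a+1) cm := by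
  simp [ppFields]

lemma zip_snoc (cm : List Nat) : ∀ (last j : Nat),
    (last :: cm.map (· + 1)).zip (cm ++ [j]) =
      (last :: cm.map (· + 1)).zip cm ++ [(ppLast last cm, j)] := by
  induction cm with
  | nil => intro last j; simp [ppLast]
  | cons a cm ih => intro last j; simp [List.zip_cons_cons, ih (a+1), ppLast_cons]

lemma fields_snoc (cs : List Char) (last : Nat) (cm : List Nat) (j : Nat) :
    ppFields cs last cm ++
      [PySem.Chars.strip (PySem.List.slice cs (some ((ppLast last cm):Int)) (some (j:Int)))] =
    ((last :: cm.map (· + 1)).zip (cm ++ [j])).map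
      (fun ab => PySem.Chars.strip (PySem.List.slice cs (some (ab.1:Int)) (some (ab.2:Int)))) := by
  rw [zip_snoc]
  simp [ppFields]

lemma loopA_close_aux (cs : List Char) : ∀ n i last nb acc j, cs.length - i ≤ n →
    ppFindClose cs i nb = some j →
    ppArgsLoopA cs i last nb acc =
      (j, ppLast last (ppTopCommas cs i j nb), acc ++ ppFields cs last (ppTopCommas cs i j nb)) := by
  intro n
  induction n with
  | zero =>
    intro i last nb acc j hn h
    rw [ppFindClose] at h
    have hi : ¬ i < cs.length := by omega
    simp [hi] at h
  | succ n ih =>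
    intro i last nb acc j hn h
    rw [ppFindClose] at h
    by_cases hi : i < cs.length
    · simp only [hi, dif_pos] at h
      rw [ppArgsLoopA]
      simp only [hi, dif_pos]
      by_cases hp : cs[i] = '('
      · simp only [hp, if_pos] at h
        have hj := ppFindClose_bound cs (i+1) (nb+1) j h
        rw [if_neg (by intro hcon; rw [hp] at hcon; simp at hcon), if_pos hp]
        rw [show ppTopCommas cs i j nb = ppTopCommas cs (i+1) j (nb+1) by
          rw [ppTopCommas]; simp [show i < j by omega, hi, hp]]
        exact ih (i+1) last (nb+1) acc j (by omega) h
      · by_cases hq : cs[i] = ')'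
        · simp only [hq, if_pos] at h
          by_cases hz : nb = 0
          · simp only [hz, if_pos] at h
            have hji : j = i := by simpa using h.symm
            subst hji
            rw [if_pos ⟨hz, hq⟩]
            rw [show ppTopCommas cs j j nb = [] by rw [ppTopCommas]; simp]
            simp [ppLast, ppFields]
          · simp only [hz, reduceIte] at h
            have hj := ppFindClose_bound cs (i+1) (nb-1) j h
            rw [if_neg (by tauto), if_neg hp, if_pos hq]
            rw [show ppTopCommas cs i j nb = ppTopCommas cs (i+1) j (nb-1) by
              rw [ppTopCommas]; simp [show i < j by omega, hi, hq]]
            exact ih (i+1) last (nb-1) acc j (by omega) h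
        · simp only [hp, hq, reduceIte] at h
          have hj := ppFindClose_bound cs (i+1) nb j h
          rw [if_neg (by tauto), if_neg hp, if_neg hq]
          by_cases hc : nb = 0 ∧ cs[i] = ','
          · rw [if_pos hc]
            rw [show ppTopCommas cs i j nb = i :: ppTopCommas cs (i+1) j nb by
              rw [ppTopCommas]; simp [show i < j by omega, hi, hc.1, hc.2]]
            rw [ih (i+1) (i+1) nb _ j (by omega) h]
            rw [ppLast_cons, ppFields_cons]
            simp
          · rw [if_neg hc]
            rw [show ppTopCommas cs i j nb = ppTopCommas cs (i+1) j nb by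
              rw [ppTopCommas]
              have : ¬ (nb = 0 ∧ cs[i] = ',') := hc
              simp only [show i < j by omega, if_pos, hi, dif_pos, hp, hq, reduceIte, this]]
            exact ih (i+1) last nb acc j (by omega) h
    · simp [hi] at h

lemma loopA_close (cs : List Char) (i last : Nat) (nb : Int) (acc : List (List Char)) (j : Nat)
    (h : ppFindClose cs i nb = some j) :
    ppArgsLoopA cs i last nb acc =
      (j, ppLast last (ppTopCommas cs i j nb), acc ++ ppFields cs last (ppTopCommas cs i j nb)) :=
  loopA_close_aux cs (cs.length - i) i last nb acc j le_rfl h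

-- ===== VERDICT (by name: the statement is the Claim_ definition above) =====
theorem pp_args_spec : Claim_equal_pp_args := by
  intro s _
  show pp_args s = pp_args_alt s
  unfold pp_args pp_args_alt
  by_cases h0 : s = "" ∨ s.toList.head? ≠ some '('
  · simp only [h0, if_pos]
  · simp only [h0, reduceIte]
    cases hfc : ppFindClose s.toList 1 0 with
    | none =>
      have h1 := loopA_none s.toList 1 1 0 [] hfc
      rw [if_neg (Nat.not_lt.mpr h1)]
    | some j =>
      have hb := ppFindClose_bound s.toList 1 0 j hfc
      rw [loopA_close s.toList 1 1 0 [] j hfc]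
      simp only [hb.2, if_pos, List.nil_append]
      rw [fields_snoc]
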